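-- pv_equiv track=rewrite | github.com/danialrami/resume | scripts/render_latex.py | render_education_latex
-- ===== SOURCE A (Python) =====
-- def escape_latex(text: str) -> str:
--     """Escape special LaTeX characters."""
--     if not text:
--         return ''
--
--     # Convert to string if number
--     if isinstance(text, (int, float)):
--         text = str(text)
--
--     replacements = [
--         ('&', r'\&'),
--         ('%', r'\%'),
--         ('$', r'\$'),
--         ('#', r'\#'),
--         ('_', r'\_'),
--         ('{', r'\{'),
--         ('}', r'\}'),
--         ('~', r'\textasciitilde{}'),
--         ('^', r'\textasciicircum{}'),
--     ]
--     for old, new in replacements: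
--         text = text.replace(old, new)
--     return text
--
-- def render_education_latex(education: list) -> str:
--     """Render education section."""
--     lines = []
--     for edu in education:
--         institution = escape_latex(edu.get('school', ''))
--         degree = escape_latex(str(edu.get('degree', '')))
--         location = escape_latex(str(edu.get('location', '')))
--         period = escape_latex(str(edu.get('dates', '')))
--
--         lines.append('\\resumeEducationHeading')
--         lines.append(f'{{{institution}}}{{{period}}}')
--         lines.append(f'{{{degree}}}{{{location}}}')
--
--     return '\n'.join(lines)
-- ===== SOURCE B (Python) =====
-- _LATEX_MAP = {
--     '&': r'\&', '%': r'\%', '$': r'\$', '#': r'\#', '_': r'\_',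
--     '{': r'\{', '}': r'\}',
--     '~': r'\textasciitilde{}', '^': r'\textasciicircum{}',
-- }
--
-- def _escape_latex(text: str) -> str:
--     # one pass over the characters instead of nine sequential replace scans
--     return ''.join(_LATEX_MAP.get(ch, ch) for ch in text)
--
-- def render_education_latex(education: list) -> str:
--     lines = [line
--              for edu in education
--              for line in ('\\resumeEducationHeading',
--                           '{%s}{%s}' % (_escape_latex(edu.get('school', '')),
--                                         _escape_latex(str(edu.get('dates', '')))),
--                           '{%s}{%s}' % (_escape_latex(str(edu.get('degree', ''))),
--                                         _escape_latex(str(edu.get('location', '')))))]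
--     return '\n'.join(lines)
-- ===== Notes on version B (the rewrite author's own statement) =====
-- stated objective: idiomatic
-- what changed: escape_latex's nine sequential full-string replace passes become a single character-table pass (one dict lookup per char), and the line list is built by one comprehension instead of an accumulator loop.
import Mathlib
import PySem

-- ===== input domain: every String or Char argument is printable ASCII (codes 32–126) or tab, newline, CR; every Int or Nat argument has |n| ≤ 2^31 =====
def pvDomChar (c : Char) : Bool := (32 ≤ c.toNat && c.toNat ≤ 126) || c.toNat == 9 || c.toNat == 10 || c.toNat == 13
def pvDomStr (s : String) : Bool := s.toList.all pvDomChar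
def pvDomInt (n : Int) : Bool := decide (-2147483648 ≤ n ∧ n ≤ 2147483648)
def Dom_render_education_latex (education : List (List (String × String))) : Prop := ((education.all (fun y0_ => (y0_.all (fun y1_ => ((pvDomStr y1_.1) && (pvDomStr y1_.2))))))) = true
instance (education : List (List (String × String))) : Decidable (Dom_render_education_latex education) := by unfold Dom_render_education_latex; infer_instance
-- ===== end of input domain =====

-- B replaces escape_latex's nine sequential whole-string replace passes by one
-- character-table pass and builds the line list by a comprehension (idiomatic; not faster).

-- ===== PORT A =====
-- the ordered replacement table of A's escape_latex
def pvEscRepls : List (String × String) :=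
  [("&", "\\&"), ("%", "\\%"), ("$", "\\$"), ("#", "\\#"), ("_", "\\_"),
   ("{", "\\{"), ("}", "\\}"), ("~", "\\textasciitilde{}"), ("^", "\\textasciicircum{}")]

-- escape_latex: 'if not text: return ""', then nine sequential str.replace passes.
-- (the isinstance(int,float) branch is unreachable here: the argument is always a str)
def pvEscapeLatexA (text : String) : String :=
  if text = "" then ""
  else pvEscRepls.foldl (fun t r => PySem.Str.replace t r.1 r.2) text

def render_education_latex (education : List (List (String × String))) : String :=
  let lines := education.foldl (fun lines edu =>
    let institution := pvEscapeLatexA ((PySem.Dict.ofList edu).getD "school" "")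
    let degree := pvEscapeLatexA ((PySem.Dict.ofList edu).getD "degree" "")
    let location := pvEscapeLatexA ((PySem.Dict.ofList edu).getD "location" "")
    let period := pvEscapeLatexA ((PySem.Dict.ofList edu).getD "dates" "")
    lines ++ ["\\resumeEducationHeading",
              "{" ++ institution ++ "}{" ++ period ++ "}",
              "{" ++ degree ++ "}{" ++ location ++ "}"]) []
  PySem.Str.join "\n" lines

-- ===== PORT B =====
-- B's single character table
def pvLatexMap : PySem.Dict Char String :=
  PySem.Dict.mk
    [('&', "\\&"), ('%', "\\%"), ('$', "\\$"), ('#', "\\#"), ('_', "\\_"),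
     ('{', "\\{"), ('}', "\\}"), ('~', "\\textasciitilde{}"), ('^', "\\textasciicircum{}")]

-- one pass: ''.join(_LATEX_MAP.get(ch, ch) for ch in text)
def pvEscapeLatexB (text : String) : String :=
  PySem.Str.join "" (text.toList.map (fun ch => pvLatexMap.getD ch (String.ofList [ch])))

def render_education_latex_alt (education : List (List (String × String))) : String :=
  let lines := education.flatMap (fun edu =>
    ["\\resumeEducationHeading",
     "{" ++ pvEscapeLatexB ((PySem.Dict.ofList edu).getD "school" "") ++ "}{"
         ++ pvEscapeLatexB ((PySem.Dict.ofList edu).getD "dates" "") ++ "}",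
     "{" ++ pvEscapeLatexB ((PySem.Dict.ofList edu).getD "degree" "") ++ "}{"
         ++ pvEscapeLatexB ((PySem.Dict.ofList edu).getD "location" "") ++ "}"])
  PySem.Str.join "\n" lines

-- ===== PRECONDITION & SPEC =====
def Spec_render_education_latex (education : List (List (String × String))) (out : String) : Prop := out = render_education_latex_alt education
instance (education : List (List (String × String))) (out : String) : Decidable (Spec_render_education_latex education out) := by unfold Spec_render_education_latex; infer_instance

-- ===== CLAIM (what is proved, stated in full; the proofs are below) =====
def Claim_equal_render_education_latex : Prop := ∀ (education : List (List (String × String))), Dom_render_education_latex education → Spec_render_education_latex education (render_education_latex education)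

-- ===== LEMMAS AND PROOFS =====

-- pointwise description of one replace pass with a single-character pattern
def pvStep (o : Char) (rep : List Char) (l : List Char) : List Char :=
  l.flatMap (fun c => if c = o then rep else [c])

theorem pv_go_single (o : Char) (rep : List Char) :
    ∀ (cs : List Char) (fuel : Nat) (acc : List Char), cs.length ≤ fuel →
      PySem.Chars.replace.go [o] rep fuel cs acc = acc.reverse ++ pvStep o rep cs := by
  intro cs
  induction cs with
  | nil =>
    intro fuel acc _
    cases fuel <;> simp [PySem.Chars.replace.go, pvStep]
  | cons c t ih =>
    intro fuel acc h
    cases fuel with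
    | zero => simp at h
    | succ f =>
      have h' : t.length ≤ f := by simpa using h
      simp only [PySem.Chars.replace.go]
      by_cases hc : c = o
      · subst hc
        rw [if_pos (by simp [List.isPrefixOf])]
        rw [show List.drop [c].length (c :: t) = t from by simp]
        rw [ih f _ h']
        simp [pvStep]
      · rw [if_neg (by simp [List.isPrefixOf]; exact fun hh => absurd hh.symm hc)]
        rw [ih f _ h']
        simp [pvStep, hc]

theorem pv_replace_single (o : Char) (rep cs : List Char) :
    PySem.Chars.replace cs [o] rep = pvStep o rep cs := by
  simp only [PySem.Chars.replace, List.isEmpty_cons]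
  rw [if_neg (by simp)]
  simpa using pv_go_single o rep cs cs.length [] le_rfl

-- the combined per-character escape table (what nine single-char passes do to one char)
def pvEscChar (c : Char) : List Char :=
  if c = '&' then "\\&".toList
  else if c = '%' then "\\%".toList
  else if c = '$' then "\\$".toList
  else if c = '#' then "\\#".toList
  else if c = '_' then "\\_".toList
  else if c = '{' then "\\{".toList
  else if c = '}' then "\\}".toList
  else if c = '~' then "\\textasciitilde{}".toList
  else if c = '^' then "\\textasciicircum{}".toList
  else [c]

theorem pv_chain_eq (cs : List Char) :
    pvStep '^' "\\textasciicircum{}".toList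
      (pvStep '~' "\\textasciitilde{}".toList
        (pvStep '}' "\\}".toList
          (pvStep '{' "\\{".toList
            (pvStep '_' "\\_".toList
              (pvStep '#' "\\#".toList
                (pvStep '$' "\\$".toList
                  (pvStep '%' "\\%".toList
                    (pvStep '&' "\\&".toList cs))))))))
      = cs.flatMap pvEscChar := by
  simp only [pvStep, List.flatMap_assoc]
  apply List.flatMap_congr
  intro c _
  by_cases h1 : c = '&'; · subst h1; decide
  by_cases h2 : c = '%'; · subst h2; decide
  by_cases h3 : c = '$'; · subst h3; decide
  by_cases h4 : c = '#'; · subst h4; decide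
  by_cases h5 : c = '_'; · subst h5; decide
  by_cases h6 : c = '{'; · subst h6; decide
  by_cases h7 : c = '}'; · subst h7; decide
  by_cases h8 : c = '~'; · subst h8; decide
  by_cases h9 : c = '^'; · subst h9; decide
  simp [pvEscChar, h1, h2, h3, h4, h5, h6, h7, h8, h9]

theorem pv_join_nil_flatten (xss : List (List Char)) :
    PySem.Chars.join [] xss = xss.flatten := by
  induction xss with
  | nil => simp [PySem.Chars.join_nil]
  | cons p rest ih =>
    cases rest with
    | nil => simp [PySem.Chars.join_singleton]
    | cons q r => simp [PySem.Chars.join_cons_cons] at ih ⊢; simpa using ih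

theorem pv_map_toList (ch : Char) :
    (pvLatexMap.getD ch (String.ofList [ch])).toList = pvEscChar ch := by
  by_cases h1 : ch = '&'; · subst h1; decide
  by_cases h2 : ch = '%'; · subst h2; decide
  by_cases h3 : ch = '$'; · subst h3; decide
  by_cases h4 : ch = '#'; · subst h4; decide
  by_cases h5 : ch = '_'; · subst h5; decide
  by_cases h6 : ch = '{'; · subst h6; decide
  by_cases h7 : ch = '}'; · subst h7; decide
  by_cases h8 : ch = '~'; · subst h8; decide
  by_cases h9 : ch = '^'; · subst h9; decide
  simp only [pvLatexMap, PySem.Dict.getD, PySem.Dict.get?_mk_cons]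
  rw [if_neg (by simp [Ne.symm h1]), if_neg (by simp [Ne.symm h2]),
      if_neg (by simp [Ne.symm h3]), if_neg (by simp [Ne.symm h4]),
      if_neg (by simp [Ne.symm h5]), if_neg (by simp [Ne.symm h6]),
      if_neg (by simp [Ne.symm h7]), if_neg (by simp [Ne.symm h8]),
      if_neg (by simp [Ne.symm h9])]
  simp [pvEscChar, h1, h2, h3, h4, h5, h6, h7, h8, h9, PySem.Dict.get?, String.toList_ofList]

theorem pv_escB_toList (s : String) :
    (pvEscapeLatexB s).toList = s.toList.flatMap pvEscChar := by
  simp only [pvEscapeLatexB, PySem.Str.toList_join]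
  rw [show ("" : String).toList = [] from rfl]
  rw [pv_join_nil_flatten]
  rw [List.map_map, List.flatMap]
  congr 1
  apply List.map_congr_left
  intro ch _
  exact pv_map_toList ch

theorem pv_escape_eq (s : String) : pvEscapeLatexA s = pvEscapeLatexB s := by
  by_cases hs : s = ""
  · subst hs; simp [pvEscapeLatexA, pvEscapeLatexB]; decide
  · rw [← String.toList_inj]
    simp only [pvEscapeLatexA, if_neg hs, pvEscRepls, List.foldl_cons, List.foldl_nil]
    simp only [PySem.Str.toList_replace,
      show ("&" : String).toList = ['&'] from rfl, show ("%" : String).toList = ['%'] from rfl,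
      show ("$" : String).toList = ['$'] from rfl, show ("#" : String).toList = ['#'] from rfl,
      show ("_" : String).toList = ['_'] from rfl, show ("{" : String).toList = ['{'] from rfl,
      show ("}" : String).toList = ['}'] from rfl, show ("~" : String).toList = ['~'] from rfl,
      show ("^" : String).toList = ['^'] from rfl]
    rw [pv_escB_toList]
    rw [← pv_chain_eq s.toList]
    simp only [pv_replace_single]

-- ===== VERDICT (by name: the statement is the Claim_ definition above) =====
theorem render_education_latex_spec : Claim_equal_render_education_latex := by
  intro education _
  unfold Spec_render_education_latex render_education_latex render_education_latex_alt
  rw [PySem.List.foldl_append_eq_flatMap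
    (g := fun edu =>
      ["\\resumeEducationHeading",
       "{" ++ pvEscapeLatexA ((PySem.Dict.ofList edu).getD "school" "") ++ "}{"
           ++ pvEscapeLatexA ((PySem.Dict.ofList edu).getD "dates" "") ++ "}",
       "{" ++ pvEscapeLatexA ((PySem.Dict.ofList edu).getD "degree" "") ++ "}{"
           ++ pvEscapeLatexA ((PySem.Dict.ofList edu).getD "location" "") ++ "}"])]
  simp [pv_escape_eq]
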